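-- pv_equiv track=rewrite | github.com/iofu728/ProgrammingCode | work/20A/1.py | get_1_5
-- ===== SOURCE A (Python) =====
-- def get_1_5(tt):
--     ta = [int(ii >= 1) for ii in tt]
--     tb = [ii for ii, jj in enumerate(ta) if jj > 0]
--     tc = []
--     for ii in tb:
--         if ii + 1 in tb and ii + 2 in tb and ii + 3 in tb and ii + 4 in tb:
--             tc.append(ii)
--     return tc
-- ===== SOURCE B (Python) =====
-- def get_1_5(tt):
--     res = []
--     run = 0
--     for j, x in enumerate(tt):
--         if x >= 1:
--             run += 1
--         else:
--             run = 0
--         if run >= 5: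
--             res.append(j - 4)
--     return res
-- ===== Notes on version B (the rewrite author's own statement) =====
-- stated objective: faster
-- what changed: Replaced A's three-pass build (indicator list, index list, then per-index four linear membership scans of that index list) by a single pass keeping a counter of consecutive positive values that emits j-4 whenever the run reaches 5.
import Mathlib
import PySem

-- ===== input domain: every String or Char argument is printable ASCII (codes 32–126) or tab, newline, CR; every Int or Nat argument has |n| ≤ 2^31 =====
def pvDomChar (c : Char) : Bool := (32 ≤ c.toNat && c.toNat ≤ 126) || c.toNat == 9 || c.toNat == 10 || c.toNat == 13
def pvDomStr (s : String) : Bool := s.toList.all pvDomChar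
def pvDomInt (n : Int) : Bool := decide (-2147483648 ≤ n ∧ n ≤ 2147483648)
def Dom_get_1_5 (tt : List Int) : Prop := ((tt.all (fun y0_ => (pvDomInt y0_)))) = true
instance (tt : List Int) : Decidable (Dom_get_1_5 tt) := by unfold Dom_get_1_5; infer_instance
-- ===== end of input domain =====

-- B replaces A's quadratic membership scans by one linear pass with a run counter (measured faster).

-- ===== PORT A =====
def get_1_5 (tt : List Int) : List Int :=
  let ta : List Int := tt.map (fun ii => if 1 ≤ ii then 1 else 0)
  let tb : List Int := ((PySem.List.enumerate ta 0).filter (fun p => decide (0 < p.2))).map (fun p => p.1)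
  tb.foldl (fun tc ii =>
    if (ii + 1) ∈ tb ∧ (ii + 2) ∈ tb ∧ (ii + 3) ∈ tb ∧ (ii + 4) ∈ tb then tc ++ [ii] else tc) []

-- ===== PORT B =====
def get_1_5_alt (tt : List Int) : List Int :=
  (tt.foldl (fun (s : Int × List Int × Int) x =>
      let run : Int := if 1 ≤ x then s.1 + 1 else 0
      (run, if 5 ≤ run then s.2.1 ++ [s.2.2 - 4] else s.2.1, s.2.2 + 1))
    (0, [], 0)).2.1

-- ===== PRECONDITION & SPEC =====
def Spec_get_1_5 (tt : List Int) (out : List Int) : Prop := out = get_1_5_alt tt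
instance (tt : List Int) (out : List Int) : Decidable (Spec_get_1_5 tt out) := by unfold Spec_get_1_5; infer_instance

-- ===== CLAIM (what is proved, stated in full; the proofs are below) =====
def Claim_equal_get_1_5 : Prop := ∀ (tt : List Int), Dom_get_1_5 tt → Spec_get_1_5 tt (get_1_5 tt)

-- ===== LEMMAS AND PROOFS =====

-- boolean window predicate: index i starts a run of five values ≥ 1 inside tt
def pvWin (tt : List Int) (i : Nat) : Bool :=
  decide (i + 4 < tt.length) && decide (1 ≤ tt.getD i 0) && decide (1 ≤ tt.getD (i+1) 0)
    && decide (1 ≤ tt.getD (i+2) 0) && decide (1 ≤ tt.getD (i+3) 0) && decide (1 ≤ tt.getD (i+4) 0)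

-- canonical result: window starts, in increasing order, as Ints
def pvF (tt : List Int) : List Int :=
  ((List.range tt.length).filter (pvWin tt)).map (fun (i : Nat) => (i : Int))

-- length of the maximal all-≥1 suffix, computed as B computes its run counter
def pvTrail (tt : List Int) : Nat :=
  tt.foldl (fun r a => if 1 ≤ a then r + 1 else 0) 0

-- B's loop body, named for the proofs
def pvStep (st : Int × List Int × Int) (x : Int) : Int × List Int × Int :=
  let run : Int := if 1 ≤ x then st.1 + 1 else 0
  (run, if 5 ≤ run then st.2.1 ++ [st.2.2 - 4] else st.2.1, st.2.2 + 1)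

lemma pvAlt_eq_foldl (tt : List Int) :
    get_1_5_alt tt = (tt.foldl pvStep (0, [], 0)).2.1 := rfl

lemma pvTrail_snoc (p : List Int) (x : Int) :
    pvTrail (p ++ [x]) = if 1 ≤ x then pvTrail p + 1 else 0 := by
  simp [pvTrail]

lemma pvTrail_iff (k : Nat) (hk : 0 < k) (q : List Int) :
    k ≤ pvTrail q ↔ (k ≤ q.length ∧ ∀ j, q.length - k ≤ j → j < q.length → 1 ≤ q.getD j 0) := by
  induction q using List.reverseRecOn generalizing k with
  | nil =>
      simp only [pvTrail, List.foldl_nil, List.length_nil]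
      constructor
      · intro h; omega
      · rintro ⟨h, -⟩; omega
  | append_singleton p x ih =>
      rw [pvTrail_snoc]
      by_cases hx : 1 ≤ x
      · simp only [if_pos hx, List.length_append, List.length_cons, List.length_nil]
        by_cases hk1 : k = 1
        · subst hk1
          constructor
          · intro _
            refine ⟨by omega, fun j h1 h2 => ?_⟩
            have hj : j = p.length := by omega
            subst hj
            rw [List.getD_append_right p [x] 0 _ (le_refl _)]
            simpa using hx
          · intro _; omega
        · have hk' : 0 < k - 1 := by omega
          rw [show k ≤ pvTrail p + 1 ↔ k - 1 ≤ pvTrail p by omega, ih (k-1) hk']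
          constructor
          · rintro ⟨h1, h2⟩
            refine ⟨by omega, fun j hj1 hj2 => ?_⟩
            by_cases hjl : j < p.length
            · rw [List.getD_append p [x] 0 j hjl]
              exact h2 j (by omega) hjl
            · have hj : j = p.length := by omega
              subst hj
              rw [List.getD_append_right p [x] 0 _ (le_refl _)]
              simpa using hx
          · rintro ⟨h1, h2⟩
            refine ⟨by omega, fun j hj1 hj2 => ?_⟩
            have := h2 j (by omega) (by omega)
            rwa [List.getD_append p [x] 0 j hj2] at this
      · simp only [if_neg hx, List.length_append, List.length_cons, List.length_nil]
        constructor
        · intro h; omega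
        · rintro ⟨h1, h2⟩
          have := h2 p.length (by omega) (by omega)
          rw [List.getD_append_right p [x] 0 _ (le_refl _)] at this
          simp at this
          omega

lemma pvWin_prefix (p s : List Int) (i : Nat) (h : i + 4 < p.length) :
    pvWin (p ++ s) i = pvWin p i := by
  unfold pvWin
  rw [List.getD_append p s 0 i (by omega), List.getD_append p s 0 (i+1) (by omega),
      List.getD_append p s 0 (i+2) (by omega), List.getD_append p s 0 (i+3) (by omega),
      List.getD_append p s 0 (i+4) (by omega),
      show decide (i + 4 < (p ++ s).length) = true by simp [List.length_append]; omega,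
      show decide (i + 4 < p.length) = true by simp; omega]

lemma pvWin_top_false (q : List Int) (i : Nat) (h : ¬ i + 4 < q.length) :
    pvWin q i = false := by
  unfold pvWin
  rw [show decide (i + 4 < q.length) = false by simpa using h]
  simp

lemma pvF_snoc (p : List Int) (x : Int) :
    pvF (p ++ [x]) = pvF p ++ (if 5 ≤ pvTrail (p ++ [x]) then [((p.length : Int) - 4)] else []) := by
  have hlen : (p ++ [x]).length = p.length + 1 := by simp
  by_cases h4 : 4 ≤ p.length
  · obtain ⟨a, hm⟩ : ∃ a, p.length = a + 4 := ⟨p.length - 4, by omega⟩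
    have hrange : List.range (a + 4) = List.range a ++ [a, a+1, a+2, a+3] := by
      rw [List.range_add]
      norm_num [List.range_succ]
    -- decompose pvF (p ++ [x])
    have hq : pvF (p ++ [x])
        = ((List.range a).filter (pvWin p)).map (fun (i : Nat) => (i : Int))
          ++ (if pvWin (p ++ [x]) a then [((a : Nat) : Int)] else []) := by
      unfold pvF
      rw [hlen, hm, List.range_succ, List.filter_append,
          show List.filter (pvWin (p ++ [x])) [a + 4] = [] by
            simp [pvWin_top_false (p ++ [x]) (a+4) (by rw [hlen]; omega)],
          List.append_nil, hrange, List.filter_append]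
      rw [List.filter_congr (fun i hi => by
            exact pvWin_prefix p [x] i (by simp at hi; omega))]
      have h123 : List.filter (pvWin (p ++ [x])) [a+1, a+2, a+3] = [] := by
        simp [List.filter,
          pvWin_top_false (p ++ [x]) (a+1) (by rw [hlen]; omega),
          pvWin_top_false (p ++ [x]) (a+2) (by rw [hlen]; omega),
          pvWin_top_false (p ++ [x]) (a+3) (by rw [hlen]; omega)]
      by_cases hw : pvWin (p ++ [x]) a
      · rw [show (([a, a+1, a+2, a+3] : List Nat)) = [a] ++ [a+1,a+2,a+3] by rfl,
            List.filter_append, h123, List.append_nil]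
        simp [List.filter, hw]
      · rw [show (([a, a+1, a+2, a+3] : List Nat)) = [a] ++ [a+1,a+2,a+3] by rfl,
            List.filter_append, h123, List.append_nil]
        simp [List.filter, hw]
    -- decompose pvF p
    have hp : pvF p = ((List.range a).filter (pvWin p)).map (fun (i : Nat) => (i : Int)) := by
      unfold pvF
      rw [hm, hrange, List.filter_append,
          show List.filter (pvWin p) [a, a+1, a+2, a+3] = [] by
            simp [List.filter,
              pvWin_top_false p a (by omega), pvWin_top_false p (a+1) (by omega),
              pvWin_top_false p (a+2) (by omega), pvWin_top_false p (a+3) (by omega)],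
          List.append_nil]
    -- the window test equals the run test
    have hwin : pvWin (p ++ [x]) a = true ↔ 5 ≤ pvTrail (p ++ [x]) := by
      rw [pvTrail_iff 5 (by omega), hlen, hm]
      unfold pvWin
      rw [hlen, hm]
      simp only [Bool.and_eq_true, decide_eq_true_eq]
      constructor
      · rintro ⟨⟨⟨⟨⟨-, h0⟩, h1⟩, h2⟩, h3⟩, h5⟩
        refine ⟨by omega, fun j hj1 hj2 => ?_⟩
        have : j = a ∨ j = a+1 ∨ j = a+2 ∨ j = a+3 ∨ j = a+4 := by omega
        rcases this with rfl | rfl | rfl | rfl | rfl <;> assumption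
      · rintro ⟨-, h⟩
        refine ⟨⟨⟨⟨⟨by omega, h a (by omega) (by omega)⟩, h (a+1) (by omega) (by omega)⟩,
          h (a+2) (by omega) (by omega)⟩, h (a+3) (by omega) (by omega)⟩,
          h (a+4) (by omega) (by omega)⟩
    rw [hq, hp]
    congr 1
    by_cases h5 : 5 ≤ pvTrail (p ++ [x])
    · rw [if_pos h5, if_pos (hwin.mpr h5)]
      have : ((a : Nat) : Int) = (p.length : Int) - 4 := by rw [hm]; push_cast; ring
      rw [this]
    · rw [if_neg h5, if_neg (fun hw => h5 (hwin.mp hw))]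
  · -- short list: everything is empty
    have hq : pvF (p ++ [x]) = [] := by
      unfold pvF
      have hf : List.filter (pvWin (p ++ [x])) (List.range (p ++ [x]).length) = [] :=
        List.filter_eq_nil_iff.mpr fun i hi => by
          simp only [Bool.not_eq_true]
          exact pvWin_top_false (p ++ [x]) i (by rw [hlen]; omega)
      rw [hf]
      rfl
    have hp : pvF p = [] := by
      unfold pvF
      have hf : List.filter (pvWin p) (List.range p.length) = [] :=
        List.filter_eq_nil_iff.mpr fun i hi => by
          simp only [Bool.not_eq_true]
          exact pvWin_top_false p i (by omega)
      rw [hf]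
      rfl
    have h5 : ¬ 5 ≤ pvTrail (p ++ [x]) := by
      intro h
      have := (pvTrail_iff 5 (by omega) (p ++ [x])).mp h
      rw [hlen] at this
      omega
    rw [hq, hp, if_neg h5]
    rfl

lemma pvB_loop (s p : List Int) :
    s.foldl pvStep ((pvTrail p : Int), pvF p, (p.length : Int))
      = ((pvTrail (p ++ s) : Int), pvF (p ++ s), ((p ++ s).length : Int)) := by
  induction s generalizing p with
  | nil => simp
  | cons x s ih =>
      have hrun : (if 1 ≤ x then (pvTrail p : Int) + 1 else 0) = (pvTrail (p ++ [x]) : Int) := by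
        rw [pvTrail_snoc]; split <;> simp
      have hstep : pvStep ((pvTrail p : Int), pvF p, (p.length : Int)) x
          = ((pvTrail (p ++ [x]) : Int), pvF (p ++ [x]), ((p ++ [x]).length : Int)) := by
        unfold pvStep
        simp only [hrun]
        refine Prod.ext rfl (Prod.ext ?_ ?_)
        · rw [pvF_snoc]
          by_cases h5 : 5 ≤ pvTrail (p ++ [x])
          · rw [if_pos h5, if_pos (by exact_mod_cast h5)]
          · rw [if_neg h5, if_neg (by exact_mod_cast h5), List.append_nil]
        · simp [List.length_append]
      rw [List.foldl_cons, hstep, ih (p ++ [x])]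
      simp

lemma pvB_eq (tt : List Int) : get_1_5_alt tt = pvF tt := by
  rw [pvAlt_eq_foldl]
  have h := pvB_loop tt []
  simp only [List.nil_append] at h
  have h0 : ((pvTrail ([] : List Int) : Int), pvF ([] : List Int), ((([] : List Int)).length : Int))
      = ((0 : Int), ([] : List Int), (0 : Int)) := by
    simp [pvTrail, pvF]
  rw [h0] at h
  rw [h]

-- characterization of A's index list tb
lemma pvTb (l : List Int) (s : Int) :
    ((PySem.List.enumerate (l.map (fun ii => if 1 ≤ ii then (1:Int) else (0:Int))) s).filter
        (fun p => decide (0 < p.2))).map (fun p => p.1)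
      = ((List.range l.length).filter (fun i => decide (1 ≤ l.getD i 0))).map (fun (i : Nat) => s + (i : Int)) := by
  induction l generalizing s with
  | nil => simp [PySem.List.enumerate_nil]
  | cons x l ih =>
      simp only [List.map_cons, PySem.List.enumerate_cons, List.length_cons,
        List.range_succ_eq_map]
      have hcomp : ((List.range l.length).map Nat.succ).filter
            (fun i => decide (1 ≤ (x :: l).getD i 0))
          = ((List.range l.length).filter (fun i => decide (1 ≤ l.getD i 0))).map Nat.succ := by
        rw [List.filter_map]
        congr 1
      have htail : (((List.range l.length).filter (fun i => decide (1 ≤ l.getD i 0))).map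
            Nat.succ).map (fun (i : Nat) => s + (i : Int))
          = ((List.range l.length).filter (fun i => decide (1 ≤ l.getD i 0))).map
              (fun (i : Nat) => (s + 1) + (i : Int)) := by
        rw [List.map_map]
        exact List.map_congr_left (fun i _ => by
          show s + ((Nat.succ i : Nat) : Int) = (s + 1) + (i : Int)
          push_cast
          ring)
      by_cases hx : 1 ≤ x
      · rw [if_pos hx]
        rw [List.filter_cons_of_pos (by norm_num),
            List.filter_cons_of_pos (by simp [hx])]
        rw [List.map_cons, List.map_cons, ih (s + 1), hcomp, htail]
        simp
      · rw [if_neg hx]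
        rw [List.filter_cons_of_neg (by norm_num),
            List.filter_cons_of_neg (by simp [hx])]
        rw [ih (s + 1), hcomp, htail]

lemma pvTb0 (tt : List Int) :
    ((PySem.List.enumerate (tt.map (fun ii => if 1 ≤ ii then (1:Int) else (0:Int))) 0).filter
        (fun p => decide (0 < p.2))).map (fun p => p.1)
      = ((List.range tt.length).filter (fun i => decide (1 ≤ tt.getD i 0))).map (fun (i : Nat) => (i : Int)) := by
  rw [pvTb]
  exact List.map_congr_left (fun i _ => by ring)

lemma pvTb_mem (tt : List Int) (m : Nat) :
    ((m : Int) ∈ ((List.range tt.length).filter (fun i => decide (1 ≤ tt.getD i 0))).map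
        (fun (i : Nat) => (i : Int)))
      ↔ (m < tt.length ∧ 1 ≤ tt.getD m 0) := by
  simp only [List.mem_map, List.mem_filter, List.mem_range, decide_eq_true_eq, Nat.cast_inj]
  constructor
  · rintro ⟨i, ⟨hi, hpos⟩, rfl⟩
    exact ⟨hi, hpos⟩
  · rintro ⟨hm, hpos⟩
    exact ⟨m, ⟨hm, hpos⟩, rfl⟩

lemma pvA_eq (tt : List Int) : get_1_5 tt = pvF tt := by
  unfold get_1_5
  rw [PySem.List.foldl_append_ite_eq_filter, List.nil_append, pvTb0, List.filter_map,
      List.filter_filter]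
  unfold pvF
  congr 1
  refine List.filter_congr (fun i hi => ?_)
  have hin : i < tt.length := List.mem_range.mp hi
  rw [Bool.eq_iff_iff]
  simp only [Bool.and_eq_true, decide_eq_true_eq, Function.comp]
  rw [show ((i : Int) + 1) = (((i+1 : Nat)) : Int) by push_cast; ring,
      show ((i : Int) + 2) = (((i+2 : Nat)) : Int) by push_cast; ring,
      show ((i : Int) + 3) = (((i+3 : Nat)) : Int) by push_cast; ring,
      show ((i : Int) + 4) = (((i+4 : Nat)) : Int) by push_cast; ring,
      pvTb_mem, pvTb_mem, pvTb_mem, pvTb_mem]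
  unfold pvWin
  simp only [Bool.and_eq_true, decide_eq_true_eq]
  constructor
  · rintro ⟨⟨⟨h1a, h1b⟩, ⟨h2a, h2b⟩, ⟨h3a, h3b⟩, h4a, h4b⟩, h0⟩
    exact ⟨⟨⟨⟨⟨by omega, h0⟩, h1b⟩, h2b⟩, h3b⟩, h4b⟩
  · rintro ⟨⟨⟨⟨⟨hb, h0⟩, h1⟩, h2⟩, h3⟩, h4⟩
    exact ⟨⟨⟨by omega, h1⟩, ⟨by omega, h2⟩, ⟨by omega, h3⟩, by omega, h4⟩, h0⟩

-- ===== VERDICT (by name: the statement is the Claim_ definition above) =====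
theorem get_1_5_spec : Claim_equal_get_1_5 := by
  intro tt _
  unfold Spec_get_1_5
  rw [pvA_eq, pvB_eq]
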